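-- pv_equiv track=rewrite | github.com/yanrayw/mbedtls | tests/scripts/generate_dependency.py | split_test_case
-- ===== SOURCE A (Python) =====
-- def split_test_case(data_stream):
--     """Split data stream to one set for each test case."""
--     res = []
--     test_case = []
--     for line in data_stream:
--         if line == '\n':
--             res.append(test_case)
--             test_case = []
--         else:
--             test_case.append(line)
--     res.append(test_case)
--
--     return res
-- ===== SOURCE B (Python) =====
-- def split_test_case(data_stream):
--     """Split data stream to one set for each test case."""
--     lines = list(data_stream)
--     seps = [i for i, line in enumerate(lines) if line == '\n']
--     res = []
--     prev = 0
--     for s in seps: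
--         res.append(lines[prev:s])
--         prev = s + 1
--     res.append(lines[prev:])
--     return res
-- ===== Notes on version B (the rewrite author's own statement) =====
-- stated objective: alternative
-- what changed: Instead of one stateful pass accumulating the current group line by line, B first collects the indices of blank-line separators and then partitions the list with half-open slices between consecutive separators (plus the trailing tail).
import Mathlib
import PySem

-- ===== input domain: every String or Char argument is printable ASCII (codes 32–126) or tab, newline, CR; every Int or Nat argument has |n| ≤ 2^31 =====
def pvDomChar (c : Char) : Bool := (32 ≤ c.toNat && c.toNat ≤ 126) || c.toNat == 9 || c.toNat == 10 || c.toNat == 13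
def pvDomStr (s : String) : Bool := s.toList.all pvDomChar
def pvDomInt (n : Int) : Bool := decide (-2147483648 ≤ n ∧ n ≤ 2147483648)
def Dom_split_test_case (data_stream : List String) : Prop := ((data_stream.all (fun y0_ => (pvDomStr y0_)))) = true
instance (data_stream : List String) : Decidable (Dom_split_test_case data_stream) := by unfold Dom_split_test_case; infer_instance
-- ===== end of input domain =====

-- B replaces A's single stateful accumulation pass by a two-phase separator-index + slicing partition (alternative decomposition, same cost).


-- ===== PORT A =====
-- literal transliteration of A: one pass, state = (res, test_case)
def split_test_case (data_stream : List String) : List (List String) :=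
  let st := data_stream.foldl
    (fun (st : List (List String) × List String) line =>
      if line = "\n" then (st.1 ++ [st.2], []) else (st.1, st.2 ++ [line]))
    ([], [])
  st.1 ++ [st.2]

-- ===== PORT B =====
-- literal transliteration of B: collect separator indices, then partition by slicing
def split_test_case_alt (data_stream : List String) : List (List String) :=
  let lines := data_stream
  let seps : List Int :=
    (PySem.List.enumerate lines 0).filterMap
      (fun p => if p.2 = "\n" then some p.1 else none)
  let st := seps.foldl
    (fun (st : List (List String) × Int) s =>
      (st.1 ++ [PySem.List.slice lines (some st.2) (some s)], s + 1))
    ([], 0)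
  st.1 ++ [PySem.List.slice lines (some st.2) none]

-- ===== PRECONDITION & SPEC =====
def Spec_split_test_case (data_stream : List String) (out : List (List String)) : Prop := out = split_test_case_alt data_stream
instance (data_stream : List String) (out : List (List String)) : Decidable (Spec_split_test_case data_stream out) := by unfold Spec_split_test_case; infer_instance

-- ===== CLAIM (what is proved, stated in full; the proofs are below) =====
def Claim_equal_split_test_case : Prop := ∀ (data_stream : List String), Dom_split_test_case data_stream → Spec_split_test_case data_stream (split_test_case data_stream)

-- ===== LEMMAS AND PROOFS =====

/-- Canonical grouping both ports are reduced to. -/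
def splitSep : List String → List (List String)
  | [] => [[]]
  | x :: xs =>
    if x = "\n" then [] :: splitSep xs
    else
      match splitSep xs with
      | [] => [[x]]
      | g :: gs => (x :: g) :: gs

/-- Prepend `tc` onto the head group. -/
def mapHead (tc : List String) : List (List String) → List (List String)
  | [] => [tc]
  | g :: gs => (tc ++ g) :: gs

theorem splitSep_ne_nil (xs : List String) : splitSep xs ≠ [] := by
  cases xs with
  | nil => simp [splitSep]
  | cons x xs =>
    simp only [splitSep]
    split_ifs
    · simp
    · cases h : splitSep xs <;> simp

theorem A_fold (xs : List String) (res : List (List String)) (tc : List String) :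
    (xs.foldl
      (fun (st : List (List String) × List String) line =>
        if line = "\n" then (st.1 ++ [st.2], []) else (st.1, st.2 ++ [line]))
      (res, tc)).1 ++
      [(xs.foldl
        (fun (st : List (List String) × List String) line =>
          if line = "\n" then (st.1 ++ [st.2], []) else (st.1, st.2 ++ [line]))
        (res, tc)).2] = res ++ mapHead tc (splitSep xs) := by
  induction xs generalizing res tc with
  | nil => simp [mapHead, splitSep]
  | cons x xs ih =>
    by_cases hx : x = "\n"
    · simp only [List.foldl_cons, hx, ih, splitSep]
      simp
      cases h : splitSep xs with
      | nil => exact absurd h (splitSep_ne_nil xs)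
      | cons g gs => simp [mapHead]
    · simp only [List.foldl_cons, if_neg hx, ih, splitSep]
      cases h : splitSep xs with
      | nil => exact absurd h (splitSep_ne_nil xs)
      | cons g gs => simp [mapHead]

/-- Separator indices of `xs` when `xs` sits at offset `q`. -/
def sepsIdx : List String → Nat → List Int
  | [], _ => []
  | x :: xs, q => if x = "\n" then ((q : Nat) : Int) :: sepsIdx xs (q + 1) else sepsIdx xs (q + 1)

/-- Recursive form of B's partition loop. -/
def partB (lines : List String) : List Int → Int → List (List String)
  | [], prev => [PySem.List.slice lines (some prev) none]
  | s :: ss, prev => PySem.List.slice lines (some prev) (some s) :: partB lines ss (s + 1)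

theorem seps_enum (xs : List String) (q : Nat) :
    (PySem.List.enumerate xs ((q : Nat) : Int)).filterMap
      (fun p => if p.2 = "\n" then some p.1 else none) = sepsIdx xs q := by
  induction xs generalizing q with
  | nil => simp [PySem.List.enumerate_nil, sepsIdx]
  | cons x xs ih =>
    have h1 : ((q : Int) + 1) = (((q + 1 : Nat)) : Int) := by push_cast; ring
    rw [PySem.List.enumerate_cons, List.filterMap_cons, h1, ih]
    by_cases hx : x = "\n" <;> simp [sepsIdx, hx]

theorem B_fold (lines : List String) (seps : List Int) (res : List (List String)) (prev : Int) :
    (seps.foldl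
      (fun (st : List (List String) × Int) s =>
        (st.1 ++ [PySem.List.slice lines (some st.2) (some s)], s + 1))
      (res, prev)).1 ++
      [PySem.List.slice lines
        (some (seps.foldl
          (fun (st : List (List String) × Int) s =>
            (st.1 ++ [PySem.List.slice lines (some st.2) (some s)], s + 1))
          (res, prev)).2) none] = res ++ partB lines seps prev := by
  induction seps generalizing res prev with
  | nil => simp [partB]
  | cons s ss ih => simp [partB, ih]

theorem take_succ_of_drop (lines : List String) (prev q : Nat) (x : String) (xs : List String)
    (hpq : prev ≤ q) (hd : lines.drop q = x :: xs) :
    List.take (q + 1 - prev) (lines.drop prev) = List.take (q - prev) (lines.drop prev) ++ [x] := by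
  have hq : lines[q]? = some x := by
    have h0 : (lines.drop q)[0]? = some x := by rw [hd]; rfl
    rw [List.getElem?_drop] at h0
    simpa using h0
  have hget : (lines.drop prev)[q - prev]? = some x := by
    rw [List.getElem?_drop]
    have h2 : prev + (q - prev) = q := by omega
    rw [h2, hq]
  have h1 : q + 1 - prev = (q - prev) + 1 := by omega
  rw [h1, List.take_add_one, hget]
  rfl

theorem mapHead_nil (xs : List String) : mapHead [] (splitSep xs) = splitSep xs := by
  cases h : splitSep xs with
  | nil => exact absurd h (splitSep_ne_nil xs)
  | cons g gs => simp [mapHead]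

theorem part_eq (xs : List String) (lines : List String) (prev q : Nat)
    (hpq : prev ≤ q) (hd : lines.drop q = xs) :
    partB lines (sepsIdx xs q) ((prev : Nat) : Int) =
      mapHead (List.take (q - prev) (lines.drop prev)) (splitSep xs) := by
  induction xs generalizing prev q with
  | nil =>
    have hlen : lines.length ≤ q := List.drop_eq_nil_iff.mp hd
    have ht : List.take (q - prev) (lines.drop prev) = lines.drop prev :=
      List.take_of_length_le (by simp; omega)
    simp [sepsIdx, partB, splitSep, mapHead, PySem.List.slice_from_natCast, ht]
  | cons x xs ih =>
    have hd' : lines.drop (q + 1) = xs := by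
      have h2 : lines.drop (q + 1) = (lines.drop q).drop 1 := by
        rw [List.drop_drop]
      rw [h2, hd]; rfl
    have h1 : ((q : Int) + 1) = (((q + 1 : Nat)) : Int) := by push_cast; ring
    by_cases hx : x = "\n"
    · subst hx
      have hrec := ih (q + 1) (q + 1) (le_refl _) hd'
      simp only [Nat.sub_self, List.take_zero, mapHead_nil] at hrec
      simp only [sepsIdx, splitSep, ite_true]
      simp only [partB]
      rw [h1, hrec, PySem.List.slice_natCast]
      cases h : splitSep xs with
      | nil => exact absurd h (splitSep_ne_nil xs)
      | cons g gs => simp [mapHead]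
    · simp only [sepsIdx, if_neg hx, splitSep]
      rw [ih prev (q + 1) (by omega) hd']
      rw [take_succ_of_drop lines prev q x xs hpq hd]
      cases h : splitSep xs with
      | nil => exact absurd h (splitSep_ne_nil xs)
      | cons g gs => simp [mapHead, List.append_assoc]

theorem both_eq_splitSep (ds : List String) : split_test_case ds = split_test_case_alt ds := by
  have hA : split_test_case ds = mapHead [] (splitSep ds) := by
    unfold split_test_case
    exact A_fold ds [] []
  have hB : split_test_case_alt ds = mapHead [] (splitSep ds) := by
    unfold split_test_case_alt
    have h0 : (0 : Int) = ((0 : Nat) : Int) := by norm_num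
    simp only [h0, seps_enum ds 0]
    rw [B_fold ds (sepsIdx ds 0) [] ((0 : Nat) : Int)]
    rw [part_eq ds ds 0 0 (le_refl _) (by simp)]
    simp
  rw [hA, hB]

-- ===== VERDICT (by name: the statement is the Claim_ definition above) =====
theorem split_test_case_spec : Claim_equal_split_test_case := by
  intro ds _
  unfold Spec_split_test_case
  exact both_eq_splitSep ds
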